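-- pv_equiv track=rewrite | github.com/aerovfx/Fullstack4kid | TOPIC_PYTHON/PYTHON_CHALLENGE/LEVEL2/b14L2_mang2chieu.py | find_min_max_column
-- ===== SOURCE A (Python) =====
-- def find_min_max_column(matrix):
--     min_values = []
--     max_values = []
--     num_rows = len(matrix)
--     num_cols = len(matrix[0])
--
--     for col in range(num_cols):
--         column = [matrix[row][col] for row in range(num_rows)]
--         min_val = min(column)
--         max_val = max(column)
--         min_values.append(min_val)
--         max_values.append(max_val)
--
--     return min_values, max_values
-- ===== SOURCE B (Python) =====
-- def find_min_max_column(matrix):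
--     min_values = list(matrix[0])
--     max_values = list(matrix[0])
--     for row in matrix[1:]:
--         min_values = [min(m, row[c]) for c, m in enumerate(min_values)]
--         max_values = [max(m, row[c]) for c, m in enumerate(max_values)]
--     return min_values, max_values
-- ===== Notes on version B (the rewrite author's own statement) =====
-- stated objective: alternative
-- what changed: Column-major gather-each-column-then-scan is replaced by a single row-major pass that seeds the per-column extrema with the first row and folds each remaining row into them.
import Mathlib
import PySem

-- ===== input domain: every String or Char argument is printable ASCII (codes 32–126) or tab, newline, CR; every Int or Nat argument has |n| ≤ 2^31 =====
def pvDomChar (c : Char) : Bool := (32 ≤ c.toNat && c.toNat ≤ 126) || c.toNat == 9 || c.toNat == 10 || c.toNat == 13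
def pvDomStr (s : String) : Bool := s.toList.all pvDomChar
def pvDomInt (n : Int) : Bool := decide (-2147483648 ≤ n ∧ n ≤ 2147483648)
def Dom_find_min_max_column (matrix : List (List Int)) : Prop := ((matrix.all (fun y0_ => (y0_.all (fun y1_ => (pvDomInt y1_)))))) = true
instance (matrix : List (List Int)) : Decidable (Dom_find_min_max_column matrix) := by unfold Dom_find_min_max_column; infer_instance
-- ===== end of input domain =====

-- B replaces A's column-major gather-and-scan by one row-major pass keeping running per-column extrema (objective: alternative decomposition, same cost).

-- ===== PORT A =====
def find_min_max_column (matrix : List (List Int)) : List Int × List Int :=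
  let num_rows : Int := matrix.length
  let num_cols : Int := (PySem.List.pyGetD matrix 0 []).length
  (PySem.List.pyRange 0 num_cols 1).foldl
    (fun acc col =>
      let column := (PySem.List.pyRange 0 num_rows 1).map
        (fun row => PySem.List.pyGetD (PySem.List.pyGetD matrix row []) col 0)
      let min_val := (PySem.List.min? column (fun y => y)).getD 0
      let max_val := (PySem.List.max? column (fun y => y)).getD 0
      (acc.1 ++ [min_val], acc.2 ++ [max_val]))
    ([], [])

-- ===== PORT B =====
def find_min_max_column_alt (matrix : List (List Int)) : List Int × List Int :=
  let first := PySem.List.pyGetD matrix 0 []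
  (PySem.List.slice matrix (some 1) none).foldl
    (fun acc row =>
      ((PySem.List.enumerate acc.1 0).map (fun p => min p.2 (PySem.List.pyGetD row p.1 0)),
       (PySem.List.enumerate acc.2 0).map (fun p => max p.2 (PySem.List.pyGetD row p.1 0))))
    (first, first)

-- ===== PRECONDITION & SPEC =====
-- Python A raises IndexError on an empty matrix (matrix[0]) and on a row shorter than the
-- first row (matrix[row][col]); Pre_ excludes exactly those inputs.
def Pre_find_min_max_column (matrix : List (List Int)) : Prop :=
  matrix ≠ [] ∧ ∀ row ∈ matrix, (matrix.headD []).length ≤ row.length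
instance (matrix : List (List Int)) : Decidable (Pre_find_min_max_column matrix) := by
  unfold Pre_find_min_max_column; infer_instance
def pvWitness_find_min_max_column : List (List Int) := [[1, 2], [3, 4], [-5, 0]]

def Spec_find_min_max_column (matrix : List (List Int)) (out : List Int × List Int) : Prop := out = find_min_max_column_alt matrix
instance (matrix : List (List Int)) (out : List Int × List Int) : Decidable (Spec_find_min_max_column matrix out) := by unfold Spec_find_min_max_column; infer_instance

-- ===== CLAIM (what is proved, stated in full; the proofs are below) =====
def Claim_equal_find_min_max_column : Prop := ∀ (matrix : List (List Int)), Dom_find_min_max_column matrix → Pre_find_min_max_column matrix → Spec_find_min_max_column matrix (find_min_max_column matrix)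

-- ===== LEMMAS AND PROOFS =====

-- A's loop appends one min and one max per column: it is a map over the column indices.
theorem foldl_pair_append (l : List Int) (f g : Int → Int) (a b : List Int) :
    l.foldl (fun acc c => (acc.1 ++ [f c], acc.2 ++ [g c])) (a, b) = (a ++ l.map f, b ++ l.map g) := by
  induction l generalizing a b with
  | nil => simp
  | cons x t ih => simp [List.foldl_cons, ih]

theorem enumerate_map {α β : Type} (f : α → β) (l : List α) (s : Int) :
    PySem.List.enumerate (l.map f) s = (PySem.List.enumerate l s).map (fun p => (p.1, f p.2)) := by
  induction l generalizing s with
  | nil => simp [PySem.List.enumerate_nil]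
  | cons x t ih => simp [PySem.List.enumerate_cons, ih]

theorem enumerate_enumerate {α : Type} (l : List α) (s : Int) :
    PySem.List.enumerate (PySem.List.enumerate l s) s
      = (PySem.List.enumerate l s).map (fun p => (p.1, p)) := by
  induction l generalizing s with
  | nil => simp [PySem.List.enumerate_nil]
  | cons x t ih => simp [PySem.List.enumerate_cons, ih]

-- B's fold over a pair splits into the two components.
theorem foldl_pair_split {β γ : Type} (rows : List γ) (F G : β → γ → β) (xs ys : β) :
    rows.foldl (fun (acc : β × β) row => (F acc.1 row, G acc.2 row)) (xs, ys)
      = (rows.foldl F xs, rows.foldl G ys) := by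
  induction rows generalizing xs ys with
  | nil => rfl
  | cons r t ih => simp [List.foldl_cons, ih]

-- The heart: a row-major fold that rebuilds the whole extrema list per row equals,
-- per column, a fold over the rows.
theorem rowmajor_comp (op : Int → Int → Int) (rows : List (List Int)) (xs : List Int) :
    rows.foldl (fun acc row =>
        (PySem.List.enumerate acc 0).map (fun p => op p.2 (PySem.List.pyGetD row p.1 0))) xs
      = (PySem.List.enumerate xs 0).map
          (fun p => rows.foldl (fun a row => op a (PySem.List.pyGetD row p.1 0)) p.2) := by
  induction rows generalizing xs with
  | nil =>
    simpa using (PySem.List.map_snd_enumerate xs 0).symm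
  | cons r t ih =>
    rw [List.foldl_cons, ih, enumerate_map, enumerate_enumerate]
    simp [Function.comp, List.foldl_cons]

theorem find_min_max_column_cons (h : List Int) (t : List (List Int)) :
    find_min_max_column (h :: t)
      = ((PySem.List.pyRange 0 (h.length : Int) 1).map
           (fun c => (t.map (fun r => PySem.List.pyGetD r c 0)).foldl min (PySem.List.pyGetD h c 0)),
         (PySem.List.pyRange 0 (h.length : Int) 1).map
           (fun c => (t.map (fun r => PySem.List.pyGetD r c 0)).foldl max (PySem.List.pyGetD h c 0))) := by
  unfold find_min_max_column
  rw [foldl_pair_append]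
  simp only [PySem.List.pyGetD_zero_cons, List.nil_append]
  refine Prod.ext ?_ ?_ <;>
  · simp only []
    refine List.map_congr_left (fun c hc => ?_)
    have hcol : (PySem.List.pyRange 0 ((h :: t).length : Int) 1).map
        (fun row => PySem.List.pyGetD (PySem.List.pyGetD (h :: t) row []) c 0)
        = (h :: t).map (fun r => PySem.List.pyGetD r c 0) := by
      calc (PySem.List.pyRange 0 (((h :: t).length : Int)) 1).map
            (fun row => PySem.List.pyGetD (PySem.List.pyGetD (h :: t) row []) c 0)
          = ((PySem.List.pyRange 0 (((h :: t).length : Int)) 1).map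
              (fun j => PySem.List.pyGetD (h :: t) j [])).map
              (fun r => PySem.List.pyGetD r c 0) := by
            simp [List.map_map, Function.comp]
        _ = (h :: t).map (fun r => PySem.List.pyGetD r c 0) := by
            rw [PySem.List.map_pyGetD_pyRange_zero' (xs := h :: t) (d := ([] : List Int))]
    rw [hcol]
    simp [PySem.List.min?_id_cons, PySem.List.max?_id_cons, List.foldl_map]

theorem find_min_max_column_alt_cons (h : List Int) (t : List (List Int)) :
    find_min_max_column_alt (h :: t)
      = ((PySem.List.pyRange 0 (h.length : Int) 1).map
           (fun c => t.foldl (fun a row => min a (PySem.List.pyGetD row c 0)) (PySem.List.pyGetD h c 0)),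
         (PySem.List.pyRange 0 (h.length : Int) 1).map
           (fun c => t.foldl (fun a row => max a (PySem.List.pyGetD row c 0)) (PySem.List.pyGetD h c 0))) := by
  unfold find_min_max_column_alt
  rw [PySem.List.slice_from_one]
  simp only [PySem.List.pyGetD_zero_cons, List.tail_cons]
  rw [foldl_pair_split (β := List Int) (γ := List Int) (rows := t)
        (F := fun b row => (PySem.List.enumerate b 0).map (fun p => min p.2 (PySem.List.pyGetD row p.1 0)))
        (G := fun b row => (PySem.List.enumerate b 0).map (fun p => max p.2 (PySem.List.pyGetD row p.1 0)))
        (xs := h) (ys := h),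
      rowmajor_comp, rowmajor_comp,
      PySem.List.enumerate_eq_map_pyRange (d := (0 : Int)), List.map_map, List.map_map]
  simp

-- ===== VERDICT (by name: the statement is the Claim_ definition above) =====
theorem find_min_max_column_spec : Claim_equal_find_min_max_column := by
  intro matrix _ hpre
  unfold Spec_find_min_max_column
  obtain ⟨hne, -⟩ := hpre
  obtain ⟨h, t, rfl⟩ : ∃ h t, matrix = h :: t := by
    cases matrix with
    | nil => exact absurd rfl hne
    | cons h t => exact ⟨h, t, rfl⟩
  rw [find_min_max_column_cons, find_min_max_column_alt_cons]
  refine Prod.ext ?_ ?_ <;> · simp [List.foldl_map]
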